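-- pv_equiv track=rewrite | github.com/leo-editor/leo-editor | leo/core/leoMenu.py | capitalizeMinibufferMenuName
-- ===== SOURCE A (Python) =====
-- def capitalizeMinibufferMenuName (s,removeHyphens):
--
--     result = []
--     for i in range(len(s)):
--         ch = s[i]
--         prev = i > 0 and s[i-1] or ''
--         prevprev = i > 1 and s[i-2] or ''
--         if (
--             i == 0 or
--             i == 1 and prev == '&' or
--             prev == '-' or
--             prev == '&' and prevprev == '-'
--         ):
--             result.append(ch.capitalize())
--         elif removeHyphens and ch == '-':
--             result.append(' ')
--         else:
--             result.append(ch)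
--     return ''.join(result)
-- ===== SOURCE B (Python) =====
-- def capitalizeMinibufferMenuName(s, removeHyphens):
--     # Single forward pass driven by a 3-state machine; no index lookback.
--     NORMAL, WORD_START, AFTER_AMP = 0, 1, 2
--     state = WORD_START
--     out = []
--     for ch in s:
--         if state != NORMAL:
--             out.append(ch.capitalize())
--         elif removeHyphens and ch == '-':
--             out.append(' ')
--         else:
--             out.append(ch)
--         if ch == '-':
--             state = WORD_START
--         elif ch == '&' and state == WORD_START:
--             state = AFTER_AMP
--         else:
--             state = NORMAL
--     return ''.join(out)
-- ===== Notes on version B (the rewrite author's own statement) =====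
-- stated objective: idiomatic
-- what changed: Replaced A's per-index s[i-1]/s[i-2] lookback (range(len(s)) with three indexed accesses per char) by a single forward pass over the characters driven by an explicit 3-state machine (NORMAL/WORD_START/AFTER_AMP) carried in a state variable.
import Mathlib
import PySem

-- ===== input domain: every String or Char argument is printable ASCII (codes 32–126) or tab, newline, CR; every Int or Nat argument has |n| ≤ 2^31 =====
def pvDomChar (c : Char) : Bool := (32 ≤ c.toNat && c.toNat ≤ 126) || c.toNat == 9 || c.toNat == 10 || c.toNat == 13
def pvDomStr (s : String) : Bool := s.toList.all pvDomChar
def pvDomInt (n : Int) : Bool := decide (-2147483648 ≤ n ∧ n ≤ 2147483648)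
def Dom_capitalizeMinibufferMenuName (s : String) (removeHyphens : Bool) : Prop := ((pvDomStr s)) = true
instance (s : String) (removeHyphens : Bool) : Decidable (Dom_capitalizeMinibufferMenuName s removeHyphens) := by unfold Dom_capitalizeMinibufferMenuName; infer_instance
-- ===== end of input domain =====

-- B replaces A's s[i-1]/s[i-2] index lookback by a single forward pass driven by a
-- 3-state machine (simpler/idiomatic; no speed claim). Both are total.

-- ===== PORT A =====
-- Python's `prev = i > 0 and s[i-1] or ''`: a 1-char string is never falsy, so prev is ''
-- exactly when i == 0; modeled as Option Char (none = '').  `ch.capitalize()` on a 1-char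
-- string uppercases it: PySem.Chars.upperChar (exact on the ASCII domain).
def capitalizeMinibufferMenuName (s : String) (removeHyphens : Bool) : String :=
  let cs := s.toList
  let result := (PySem.List.pyRange 0 (cs.length : Int) 1).foldl (fun (acc : List Char) i =>
    let ch := (PySem.List.pyGet? cs i).getD ' '   -- i ∈ range(len(s)): always in range
    let prev : Option Char := if 0 < i then PySem.List.pyGet? cs (i - 1) else none
    let prevprev : Option Char := if 1 < i then PySem.List.pyGet? cs (i - 2) else none
    if i = 0 ∨ (i = 1 ∧ prev = some '&') ∨ prev = some '-' ∨ (prev = some '&' ∧ prevprev = some '-') then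
      acc ++ [PySem.Chars.upperChar ch]
    else if removeHyphens && ch == '-' then
      acc ++ [' ']
    else
      acc ++ [ch]) []
  String.mk result

-- ===== PORT B =====
-- states: 0 = NORMAL, 1 = WORD_START, 2 = AFTER_AMP
def pvAltEmit (removeHyphens : Bool) (state : Nat) (ch : Char) : Char :=
  if state ≠ 0 then PySem.Chars.upperChar ch
  else if removeHyphens && ch == '-' then ' '
  else ch

def pvAltNext (state : Nat) (ch : Char) : Nat :=
  if ch == '-' then 1
  else if ch == '&' && state == 1 then 2
  else 0

def capitalizeMinibufferMenuName_alt (s : String) (removeHyphens : Bool) : String :=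
  let step := fun (p : List Char × Nat) (ch : Char) =>
    (p.1 ++ [pvAltEmit removeHyphens p.2 ch], pvAltNext p.2 ch)
  String.mk (s.toList.foldl step ([], 1)).1

-- ===== PRECONDITION & SPEC =====
def Spec_capitalizeMinibufferMenuName (s : String) (removeHyphens : Bool) (out : String) : Prop := out = capitalizeMinibufferMenuName_alt s removeHyphens
instance (s : String) (removeHyphens : Bool) (out : String) : Decidable (Spec_capitalizeMinibufferMenuName s removeHyphens out) := by unfold Spec_capitalizeMinibufferMenuName; infer_instance

-- ===== CLAIM (what is proved, stated in full; the proofs are below) =====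
def Claim_equal_capitalizeMinibufferMenuName : Prop := ∀ (s : String) (removeHyphens : Bool), Dom_capitalizeMinibufferMenuName s removeHyphens → Spec_capitalizeMinibufferMenuName s removeHyphens (capitalizeMinibufferMenuName s removeHyphens)

-- ===== LEMMAS AND PROOFS =====

-- the character A emits at index i of cs
def pvGA (rh : Bool) (cs : List Char) (i : Int) : Char :=
  let ch := (PySem.List.pyGet? cs i).getD ' '
  let prev : Option Char := if 0 < i then PySem.List.pyGet? cs (i - 1) else none
  let prevprev : Option Char := if 1 < i then PySem.List.pyGet? cs (i - 2) else none
  if i = 0 ∨ (i = 1 ∧ prev = some '&') ∨ prev = some '-' ∨ (prev = some '&' ∧ prevprev = some '-') then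
    PySem.Chars.upperChar ch
  else if rh && ch == '-' then ' '
  else ch

-- common reference recursion, parametrized by the two previous characters (none = before the string)
def pvSpec (rh : Bool) : Option Char → Option Char → List Char → List Char
  | _, _, [] => []
  | pp, p, c :: r =>
    (if p = none ∨ (pp = none ∧ p = some '&') ∨ p = some '-' ∨ (p = some '&' ∧ pp = some '-') then
       PySem.Chars.upperChar c
     else if rh && c == '-' then ' '
     else c) :: pvSpec rh p (some c) r

def pvStOf (pp p : Option Char) : Nat :=
  if p = none ∨ p = some '-' then 1
  else if p = some '&' ∧ (pp = none ∨ pp = some '-') then 2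
  else 0

lemma pvA_foldl_eq_map (rh : Bool) (cs : List Char) (acc : List Char) :
    (PySem.List.pyRange 0 (cs.length : Int) 1).foldl (fun (acc : List Char) i =>
      let ch := (PySem.List.pyGet? cs i).getD ' '
      let prev : Option Char := if 0 < i then PySem.List.pyGet? cs (i - 1) else none
      let prevprev : Option Char := if 1 < i then PySem.List.pyGet? cs (i - 2) else none
      if i = 0 ∨ (i = 1 ∧ prev = some '&') ∨ prev = some '-' ∨ (prev = some '&' ∧ prevprev = some '-') then
        acc ++ [PySem.Chars.upperChar ch]
      else if rh && ch == '-' then acc ++ [' ']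
      else acc ++ [ch]) acc
    = acc ++ (PySem.List.pyRange 0 (cs.length : Int) 1).map (pvGA rh cs) := by
  have h : (fun (acc : List Char) i =>
      let ch := (PySem.List.pyGet? cs i).getD ' '
      let prev : Option Char := if 0 < i then PySem.List.pyGet? cs (i - 1) else none
      let prevprev : Option Char := if 1 < i then PySem.List.pyGet? cs (i - 2) else none
      if i = 0 ∨ (i = 1 ∧ prev = some '&') ∨ prev = some '-' ∨ (prev = some '&' ∧ prevprev = some '-') then
        acc ++ [PySem.Chars.upperChar ch]
      else if rh && ch == '-' then acc ++ [' ']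
      else acc ++ [ch])
      = (fun (acc : List Char) i => acc ++ [pvGA rh cs i]) := by
    funext acc i
    simp only [pvGA]
    split_ifs <;> rfl
  rw [h, PySem.List.foldl_append_singleton_eq_map]

-- previous / previous-previous character before index k
def pvPOf (cs : List Char) (k : Nat) : Option Char := if k = 0 then none else cs[k - 1]?
def pvPPOf (cs : List Char) (k : Nat) : Option Char := if k ≤ 1 then none else cs[k - 2]?

lemma pvA_map_eq_spec (rh : Bool) (cs : List Char) :
    ∀ (m k : Nat), k + m = cs.length →
      (PySem.List.pyRange (k : Int) (cs.length : Int) 1).map (pvGA rh cs)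
        = pvSpec rh (pvPPOf cs k) (pvPOf cs k) (cs.drop k) := by
  intro m
  induction m with
  | zero =>
    intro k hk
    rw [PySem.List.pyRange_one_eq_nil (by omega)]
    have hle : cs.length ≤ k := by omega
    rw [List.drop_eq_nil_of_le hle]
    simp [pvSpec]
  | succ m ih =>
    intro k hk
    have hklt : k < cs.length := by omega
    rw [PySem.List.pyRange_one_cons (by exact_mod_cast hklt), List.map_cons]
    rw [List.drop_eq_getElem_cons hklt]
    have hcast : (k : Int) + 1 = ((k + 1 : Nat) : Int) := by push_cast; ring
    rw [hcast, ih (k + 1) (by omega)]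
    have hhead : pvGA rh cs (k : Int)
        = (if pvPOf cs k = none ∨ (pvPPOf cs k = none ∧ pvPOf cs k = some '&') ∨
              pvPOf cs k = some '-' ∨ (pvPOf cs k = some '&' ∧ pvPPOf cs k = some '-') then
             PySem.Chars.upperChar cs[k]
           else if rh && cs[k] == '-' then ' '
           else cs[k]) := by
      simp only [pvGA, PySem.List.pyGet?_natCast, List.getElem?_eq_getElem hklt, Option.getD_some]
      rcases Nat.eq_zero_or_pos k with h0 | h0
      · subst h0
        simp [pvPOf, pvPPOf]
      · rcases Nat.lt_or_ge k 2 with h1 | h1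
        · have : k = 1 := by omega
          subst this
          have hne : cs ≠ [] := by intro h; rw [h] at hklt; simp at hklt
          simp only [pvPOf, pvPPOf]
          norm_num
          rw [PySem.List.pyGet?_zero]
          simp [hne]
        · have e1 : ((k : Int)) - 1 = ((k - 1 : Nat) : Int) := by omega
          have e2 : ((k : Int)) - 2 = ((k - 2 : Nat) : Int) := by omega
          have g1 : (0 : Int) < (k : Int) := by exact_mod_cast h0
          have g2 : (1 : Int) < (k : Int) := by exact_mod_cast h1
          have n0 : ¬ ((k : Int) = 0) := by omega
          have n1 : ¬ ((k : Int) = 1) := by omega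
          have hk0 : ¬ (k = 0) := by omega
          have hk1 : ¬ (k ≤ 1) := by omega
          have q1 : cs[k - 1]? = some cs[k - 1] := List.getElem?_eq_getElem (by omega)
          have q2 : cs[k - 2]? = some cs[k - 2] := List.getElem?_eq_getElem (by omega)
          simp only [pvPOf, pvPPOf, if_pos g1, if_pos g2, e1, e2, PySem.List.pyGet?_natCast,
            if_neg hk0, if_neg hk1, q1, q2]
          simp [n1, hk0]
    rw [hhead]
    have hpnext : pvPOf cs (k + 1) = some cs[k] := by
      simp [pvPOf, List.getElem?_eq_getElem hklt]
    have hppnext : pvPPOf cs (k + 1) = pvPOf cs k := by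
      rcases Nat.eq_zero_or_pos k with h0 | h0
      · subst h0; simp [pvPPOf, pvPOf]
      · simp only [pvPPOf, pvPOf]
        have : ¬ (k + 1 ≤ 1) := by omega
        have : k + 1 - 2 = k - 1 := by omega
        simp_all [Nat.pos_iff_ne_zero.mp h0]
    rw [pvSpec, hpnext, hppnext]

lemma pvAlt_foldl_eq_loop (rh : Bool) (cs : List Char) :
    ∀ (acc : List Char) (pp p : Option Char),
      (cs.foldl (fun (q : List Char × Nat) ch =>
          (q.1 ++ [pvAltEmit rh q.2 ch], pvAltNext q.2 ch)) (acc, pvStOf pp p)).1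
        = acc ++ pvSpec rh pp p cs := by
  induction cs with
  | nil => intro acc pp p; simp [pvSpec]
  | cons c r ih =>
    intro acc pp p
    have hemit : pvAltEmit rh (pvStOf pp p) c
        = (if p = none ∨ (pp = none ∧ p = some '&') ∨ p = some '-' ∨ (p = some '&' ∧ pp = some '-') then
             PySem.Chars.upperChar c
           else if rh && c == '-' then ' '
           else c) := by
      simp only [pvAltEmit, pvStOf]
      split_ifs <;> simp_all <;> tauto
    have hnext : pvAltNext (pvStOf pp p) c = pvStOf p (some c) := by
      simp only [pvAltNext, pvStOf]
      by_cases hd : c = '-' <;> by_cases ha : c = '&' <;>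
        split_ifs <;> simp_all
    simp only [List.foldl_cons, hemit, hnext, pvSpec]
    rw [ih (acc ++ [_]) p (some c)]
    simp

-- ===== VERDICT (by name: the statement is the Claim_ definition above) =====
theorem capitalizeMinibufferMenuName_spec : Claim_equal_capitalizeMinibufferMenuName := by
  intro s rh _
  show capitalizeMinibufferMenuName s rh = capitalizeMinibufferMenuName_alt s rh
  unfold capitalizeMinibufferMenuName capitalizeMinibufferMenuName_alt
  simp only []
  rw [pvA_foldl_eq_map rh s.toList []]
  have h1 : pvStOf none none = 1 := by simp [pvStOf]
  rw [← h1, pvAlt_foldl_eq_loop rh s.toList [] none none]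
  have hspec := pvA_map_eq_spec rh s.toList s.toList.length 0 (by omega)
  simp only [Nat.cast_zero] at hspec
  rw [hspec]
  simp [pvPOf, pvPPOf]
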